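-- pv_equiv track=rewrite | github.com/Namenaro/full_framework_scetch | utils/ECG_utils.py | healthy
-- ===== SOURCE A (Python) =====
-- def healthy(diagnos):
--     is_heathy =True
--     axis_ok = False
--     rythm_ok = False
--     for key in diagnos.keys():
--         if key == 'electric_axis_normal':
--             if diagnos[key] == True:
--                 axis_ok = True
--                 continue
--         if key == 'regular_normosystole':
--             if diagnos[key] == True:
--                 rythm_ok = True
--                 continue
--         if diagnos[key] == True:
--             is_heathy = False
--             break
--     return axis_ok and rythm_ok and is_heathy
-- ===== SOURCE B (Python) =====
-- def healthy(diagnos):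
--     true_keys = {k for k in diagnos if diagnos[k] == True}
--     return true_keys == {'electric_axis_normal', 'regular_normosystole'}
-- ===== Notes on version B (the rewrite author's own statement) =====
-- stated objective: simpler
-- what changed: Replaces the three-flag early-break loop with building the set of True-valued keys once and a single set-equality test against {'electric_axis_normal','regular_normosystole'}.
import Mathlib
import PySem

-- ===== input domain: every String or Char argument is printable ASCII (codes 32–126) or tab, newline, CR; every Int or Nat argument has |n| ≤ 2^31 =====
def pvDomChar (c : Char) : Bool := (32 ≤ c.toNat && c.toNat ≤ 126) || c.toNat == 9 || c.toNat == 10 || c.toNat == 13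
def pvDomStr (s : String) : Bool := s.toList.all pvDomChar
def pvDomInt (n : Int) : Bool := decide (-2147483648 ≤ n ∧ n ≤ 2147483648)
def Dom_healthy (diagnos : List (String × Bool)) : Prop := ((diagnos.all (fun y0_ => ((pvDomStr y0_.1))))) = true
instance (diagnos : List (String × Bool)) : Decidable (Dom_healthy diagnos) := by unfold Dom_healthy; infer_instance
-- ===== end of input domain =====

-- B builds the set of True-valued keys once and compares it with the two-key target set,
-- instead of A's three boolean flags and early break. Return value only; no mutation either side.

-- ===== PORT A =====
-- diagnos[key] : dict lookup (first match in the association list)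
def pvLookup (diagnos : List (String × Bool)) (k : String) : Bool :=
  PySem.Dict.getD (PySem.Dict.mk diagnos) k false

-- the for-loop over diagnos.keys() with state (is_heathy, axis_ok, rythm_ok); break returns immediately
def healthyLoop (diagnos : List (String × Bool)) (keys : List String)
    (isHeathy axisOk rythmOk : Bool) : Bool :=
  match keys with
  | [] => axisOk && rythmOk && isHeathy
  | k :: rest =>
    if k == "electric_axis_normal" && pvLookup diagnos k == true then
      healthyLoop diagnos rest isHeathy true rythmOk
    else if k == "regular_normosystole" && pvLookup diagnos k == true then
      healthyLoop diagnos rest isHeathy axisOk true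
    else if pvLookup diagnos k == true then
      axisOk && rythmOk && false            -- is_heathy = False; break
    else
      healthyLoop diagnos rest isHeathy axisOk rythmOk

def healthy (diagnos : List (String × Bool)) : Bool :=
  healthyLoop diagnos (diagnos.map Prod.fst) true false false

-- ===== PORT B =====
def healthy_alt (diagnos : List (String × Bool)) : Bool :=
  let trueKeys : PySem.Set String :=
    PySem.Set.ofList ((diagnos.map Prod.fst).filter (fun k => pvLookup diagnos k == true))
  PySem.Set.equal trueKeys (PySem.Set.ofList ["electric_axis_normal", "regular_normosystole"])

-- ===== PRECONDITION & SPEC =====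
def Spec_healthy (diagnos : List (String × Bool)) (out : Bool) : Prop := out = healthy_alt diagnos
instance (diagnos : List (String × Bool)) (out : Bool) : Decidable (Spec_healthy diagnos out) := by unfold Spec_healthy; infer_instance

-- ===== CLAIM (what is proved, stated in full; the proofs are below) =====
def Claim_equal_healthy : Prop := ∀ (diagnos : List (String × Bool)), Dom_healthy diagnos → Spec_healthy diagnos (healthy diagnos)

-- ===== LEMMAS AND PROOFS =====

-- characterisation of A's loop, started with is_heathy = true
theorem healthyLoop_char (diagnos : List (String × Bool)) (keys : List String)
    (ax ry : Bool) :
    healthyLoop diagnos keys true ax ry =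
      ((ax || keys.any (fun k => k == "electric_axis_normal" && pvLookup diagnos k)) &&
       (ry || keys.any (fun k => k == "regular_normosystole" && pvLookup diagnos k)) &&
       !(keys.any (fun k => !(k == "electric_axis_normal") && !(k == "regular_normosystole")
                    && pvLookup diagnos k))) := by
  induction keys generalizing ax ry with
  | nil => simp [healthyLoop]
  | cons k rest ih =>
    by_cases h1 : (k == "electric_axis_normal" && pvLookup diagnos k) = true
    · obtain ⟨hA, hG⟩ := Bool.and_eq_true_iff.mp h1
      have hk := eq_of_beq hA; subst hk
      simp [healthyLoop, hG, ih]
    · by_cases h2 : (k == "regular_normosystole" && pvLookup diagnos k) = true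
      · obtain ⟨hR, hG⟩ := Bool.and_eq_true_iff.mp h2
        have hk := eq_of_beq hR; subst hk
        simp [healthyLoop, hG, ih]
      · by_cases h3 : pvLookup diagnos k = true
        · have hA : (k == "electric_axis_normal") = false := by
            cases hk : (k == "electric_axis_normal") <;> simp_all
          have hR : (k == "regular_normosystole") = false := by
            cases hk : (k == "regular_normosystole") <;> simp_all
          simp [healthyLoop, hA, hR, h3]
        · simp [healthyLoop, h3, ih]

-- ===== VERDICT (by name: the statement is the Claim_ definition above) =====
theorem healthy_spec : Claim_equal_healthy := by
  intro diagnos _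
  unfold Spec_healthy healthy healthy_alt
  rw [healthyLoop_char, Bool.eq_iff_iff, PySem.Set.equal_iff]
  simp only [PySem.Set.mem_ofList, List.mem_filter, List.mem_cons, List.not_mem_nil, or_false,
    Bool.and_eq_true, Bool.false_or, Bool.not_eq_true', List.any_eq_false,
    List.any_eq_true, beq_iff_eq, beq_eq_false_iff_ne, ne_eq]
  constructor
  · rintro ⟨⟨⟨xA, hxA, rfl, hgA⟩, xR, hxR, rfl, hgR⟩, hbad⟩ x
    constructor
    · rintro ⟨hx, hgx⟩
      by_contra hc
      push Not at hc
      exact (hbad x hx) ⟨⟨hc.1, hc.2⟩, hgx⟩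
    · rintro (rfl | rfl)
      · exact ⟨hxA, hgA⟩
      · exact ⟨hxR, hgR⟩
  · intro h
    have hA := (h "electric_axis_normal").mpr (Or.inl rfl)
    have hR := (h "regular_normosystole").mpr (Or.inr rfl)
    refine ⟨⟨⟨_, hA.1, rfl, hA.2⟩, ⟨_, hR.1, rfl, hR.2⟩⟩, ?_⟩
    rintro x hx ⟨⟨hne1, hne2⟩, hgx⟩
    rcases (h x).mp ⟨hx, hgx⟩ with rfl | rfl
    · exact hne1 rfl
    · exact hne2 rfl
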